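-- pv_equiv track=rewrite | github.com/BigDaMa/SASDT | transform/AlignmentUtil.py | _check_tuned_alignment
-- ===== SOURCE A (Python) =====
-- from typing import Dict, List, Tuple
--
-- def _check_tuned_alignment(tuned_alignments: List[List[str]], examples: List[Dict[str, str]]) -> List[str]:
--     currtc = None
--     currtccount = 0
--     variant_dict = dict()
--     for tc in tuned_alignments:
--         if not currtc:
--             currtc = tc
--             currtccount = 1
--             continue
--         if currtc and currtc == tc:
--             currtccount += 1
--             continue
--         if currtc and set(currtc) >= set(tc):
--             currtccount += 1
--             continue
--         variant_dict[tuple(tc)] = variant_dict[tuple(tc)] + 1 if tuple(tc) in variant_dict else 1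
--     if not variant_dict:
--         return currtc
--     if len(variant_dict) == 1:
--         return list(list(variant_dict.keys())[0])
--     elif len(variant_dict) > 1:
--         maxlength = max(list(variant_dict.values()))
--         valid_variants = [k for k, v in variant_dict.items() if v == maxlength]
--         if len(valid_variants) == 1:
--             return list(valid_variants[0])
--         else:
--             longest_variant_length = max([len(k) for k in valid_variants])
--             longest_variants = [k for k in valid_variants if len(k) == longest_variant_length]
--             if len(longest_variants) == 1:
--                 return list(longest_variants[0])
--             else:
--                 const_count = []
--                 for variant in longest_variants:
--                     count = 0
--                     for key in variant:
--                         if key.startswith("[CONST]"):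
--                             count += 1
--                     const_count.append(count)
--                 min_const_count = min(const_count)
--                 return list(longest_variants[const_count.index(min_const_count)])
-- ===== SOURCE B (Python) =====
-- from typing import Dict, List
--
-- def _check_tuned_alignment(tuned_alignments: List[List[str]], examples: List[Dict[str, str]]) -> List[str]:
--     # base = the first truthy alignment; everything before it is skipped
--     it = iter(tuned_alignments)
--     base = next((tc for tc in it if tc), [])
--     if not base:
--         return base
--     baseset = set(base)
--     variants = [tc for tc in it if tc != base and not baseset >= set(tc)]
--     if not variants:
--         return base
--     # sort-then-scan: equal variants become adjacent runs (position breaks sort ties),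
--     # so run lengths are the multiplicities -- no counting dict at all
--     occ = sorted((tuple(tc), i) for i, tc in enumerate(variants))
--     best = None  # ((count, length, -const_count, -first_position), variant)
--     rest = occ
--     while rest:
--         (v, first) = rest[0]
--         run = 1
--         while run < len(rest) and rest[run][0] == v:
--             run += 1
--         key = (run, len(v), -sum(x.startswith("[CONST]") for x in v), -first)
--         if best is None or key > best[0]:
--             best = (key, v)
--         rest = rest[run:]
--     return list(best[1])
-- ===== Notes on version B (the rewrite author's own statement) =====
-- stated objective: alternative
-- what changed: B replaces A's stateful loop with a counting dict and the nested tie-break cascade (max count, filter, max length, filter, CONST-count loop with index-of-min) by sort-then-scan: the surviving (variant, position) pairs are sorted so equal variants become adjacent runs, and one pass over the runs keeps the best (run length, variant length, -CONST count, -first position) candidate; no dictionary or counting pass is used at all.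
-- outside the precondition, e.g. on _check_tuned_alignment([], []): A returns None, B returns []
import Mathlib
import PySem

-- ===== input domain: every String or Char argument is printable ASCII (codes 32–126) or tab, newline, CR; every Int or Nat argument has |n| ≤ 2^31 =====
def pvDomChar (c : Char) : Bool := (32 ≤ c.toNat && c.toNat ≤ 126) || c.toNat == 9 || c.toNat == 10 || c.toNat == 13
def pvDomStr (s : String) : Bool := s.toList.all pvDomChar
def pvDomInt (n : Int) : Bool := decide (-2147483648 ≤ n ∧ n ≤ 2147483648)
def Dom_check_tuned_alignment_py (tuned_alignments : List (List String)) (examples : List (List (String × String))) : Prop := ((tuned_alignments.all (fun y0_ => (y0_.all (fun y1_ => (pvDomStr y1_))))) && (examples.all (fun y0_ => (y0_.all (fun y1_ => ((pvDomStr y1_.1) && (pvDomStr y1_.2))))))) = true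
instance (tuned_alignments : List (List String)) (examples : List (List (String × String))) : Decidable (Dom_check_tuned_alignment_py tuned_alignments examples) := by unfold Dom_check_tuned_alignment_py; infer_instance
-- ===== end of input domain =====

-- B replaces A's counting dict and nested tie-break cascade by sort-then-scan: the surviving
-- (variant, position) pairs are sorted so equal variants form adjacent runs, and one scan over
-- the runs keeps the best (count, length, -const, -position) candidate (objective: alternative).

-- ===== PORT A =====
-- count of keys starting with "[CONST]"  (A's inner for-loop)
def pvConstCountA (variant : List String) : Int :=
  variant.foldl (fun count key => if PySem.Str.startswith key "[CONST]" then count + 1 else count) 0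

-- one iteration of A's main for-loop over the state (currtc, currtccount, variant_dict)
def pvStepA (s : Option (List String) × Int × PySem.Dict (List String) Int)
    (tc : List String) : Option (List String) × Int × PySem.Dict (List String) Int :=
  match s with
  | (currtc, currtccount, d) =>
    if currtc = none ∨ currtc = some [] then (some tc, 1, d)        -- `if not currtc`
    else if currtc = some tc then (currtc, currtccount + 1, d)
    else if PySem.Set.issuperset (PySem.Set.ofList (currtc.getD [])) (PySem.Set.ofList tc) then
      (currtc, currtccount + 1, d)
    else (currtc, currtccount,
      if d.contains tc then d.insert tc (d.getD tc 0 + 1) else d.insert tc 1)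

def check_tuned_alignment_py (tuned_alignments : List (List String)) (examples : List (List (String × String))) : List String :=
  match tuned_alignments.foldl pvStepA (none, 0, PySem.Dict.empty) with
  | (currtc, _, variant_dict) =>
    if variant_dict.size = 0 then currtc.getD []      -- `return currtc` (currtc is None only outside Pre_)
    else if variant_dict.size = 1 then PySem.List.pyGetD variant_dict.keys 0 []
    else if variant_dict.size > 1 then
      let maxlength := (PySem.List.max? variant_dict.values (fun v => v)).getD 0
      let valid_variants := (variant_dict.items.filter (fun p => p.2 == maxlength)).map (·.1)
      if valid_variants.length = 1 then PySem.List.pyGetD valid_variants 0 []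
      else
        let longest_variant_length :=
          (PySem.List.max? (valid_variants.map (fun k => (k.length : Int))) (fun v => v)).getD 0
        let longest_variants := valid_variants.filter (fun k => (k.length : Int) == longest_variant_length)
        if longest_variants.length = 1 then PySem.List.pyGetD longest_variants 0 []
        else
          let const_count := longest_variants.map pvConstCountA
          let min_const_count := (PySem.List.min? const_count (fun v => v)).getD 0
          PySem.List.pyGetD longest_variants (((PySem.List.index? const_count min_const_count).getD 0 : Nat) : Int) []
    else []   -- unreachable (size is 0, 1 or > 1)

-- ===== PORT B =====
-- B's 'next((tc for tc in it if tc), [])': the first non-empty alignment and what follows it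
def pvSplitBase : List (List String) → List String × List (List String)
  | [] => ([], [])
  | tc :: rest => if tc.isEmpty then pvSplitBase rest else (tc, rest)

-- B's 'sum(x.startswith("[CONST]") for x in v)'
def pvConstB (v : List String) : Int :=
  (v.map (fun x => if PySem.Str.startswith x "[CONST]" then (1 : Int) else 0)).sum

-- strict '>' on Python's 4-tuple keys (lexicographic)
def pvGt4 (a b : Int × Int × Int × Int) : Bool :=
  a.1 > b.1 || (a.1 == b.1 && (a.2.1 > b.2.1 || (a.2.1 == b.2.1 &&
    (a.2.2.1 > b.2.2.1 || (a.2.2.1 == b.2.2.1 && a.2.2.2 > b.2.2.2)))))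

-- B's while loop over runs of equal variants in the sorted list; `run` counts the leading
-- entries equal to the head's variant, `rest[run:]` drops them (ported as takeWhile/dropWhile)
def pvRunScan (best : Option ((Int × Int × Int × Int) × List String)) :
    List (List String × Int) → Option ((Int × Int × Int × Int) × List String)
  | [] => best
  | (v, i) :: t =>
      let run := t.takeWhile (fun p => p.1 == v)
      let key := ((1 + run.length : Int), (v.length : Int), -(pvConstB v), -i)
      pvRunScan (if (match best with | none => true | some b => pvGt4 key b.1) then some (key, v) else best)
        (t.dropWhile (fun p => p.1 == v))
  termination_by l => l.length
  decreasing_by simpa using Nat.lt_succ_of_le (List.length_dropWhile_le _ _)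

def check_tuned_alignment_py_alt (tuned_alignments : List (List String)) (examples : List (List (String × String))) : List String :=
  match pvSplitBase tuned_alignments with
  | (base, rest) =>
    if base.isEmpty then base
    else
      let baseset := PySem.Set.ofList base
      let variants := rest.filter (fun tc =>
        !(tc == base || PySem.Set.issuperset baseset (PySem.Set.ofList tc)))
      if variants.isEmpty then base
      else
        -- sorted(...) of (variant, position) pairs; Python compares the pairs
        -- lexicographically, ported as a Lex-pair sort key (exact)
        let occ := PySem.List.sorted ((PySem.List.enumerate variants).map (fun p => (p.2, p.1)))
                     (fun p => (toLex (p.1, p.2) : Lex ((List String) × Int))) false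
        match pvRunScan none occ with
        | some best => best.2
        | none => base   -- unreachable: occ is non-empty

-- ===== PRECONDITION & SPEC =====
-- Pre_ excludes only the empty list of alignments, on which Python A returns None (not a list).
def Pre_check_tuned_alignment_py (tuned_alignments : List (List String)) (examples : List (List (String × String))) : Prop :=
  tuned_alignments ≠ []
instance (tuned_alignments : List (List String)) (examples : List (List (String × String))) : Decidable (Pre_check_tuned_alignment_py tuned_alignments examples) := by unfold Pre_check_tuned_alignment_py; infer_instance

def pvWitness_check_tuned_alignment_py : List (List String) × (List (List (String × String))) :=
  ([["a"], ["b"], ["c"]], [])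

def Spec_check_tuned_alignment_py (tuned_alignments : List (List String)) (examples : List (List (String × String))) (out : List String) : Prop := out = check_tuned_alignment_py_alt tuned_alignments examples
instance (tuned_alignments : List (List String)) (examples : List (List (String × String))) (out : List String) : Decidable (Spec_check_tuned_alignment_py tuned_alignments examples out) := by unfold Spec_check_tuned_alignment_py; infer_instance

-- ===== CLAIM (what is proved, stated in full; the proofs are below) =====
def Claim_equal_check_tuned_alignment_py : Prop := ∀ (tuned_alignments : List (List String)) (examples : List (List (String × String))), Dom_check_tuned_alignment_py tuned_alignments examples → Pre_check_tuned_alignment_py tuned_alignments examples → Spec_check_tuned_alignment_py tuned_alignments examples (check_tuned_alignment_py tuned_alignments examples)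

-- ===== LEMMAS AND PROOFS =====

-- abbreviations used only by the proofs
def pvPred (c : List String) (tc : List String) : Bool :=
  !(tc == c || PySem.Set.issuperset (PySem.Set.ofList c) (PySem.Set.ofList tc))

def pvDictStep (d : PySem.Dict (List String) Int) (tc : List String) : PySem.Dict (List String) Int :=
  if d.contains tc then d.insert tc (d.getD tc 0 + 1) else d.insert tc 1

lemma pvDictStep_eq (d : PySem.Dict (List String) Int) (tc : List String) :
    pvDictStep d tc = d.insert tc (d.getD tc 0 + 1) := by
  unfold pvDictStep
  by_cases h : d.contains tc = true
  · simp [h]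
  · simp only [Bool.not_eq_true] at h
    rw [if_neg (by simp [h]), PySem.Dict.getD_of_not_contains _ _ h]
    norm_num

-- the active phase of A's loop: currtc is frozen, the dict counts the filtered variants
lemma pvFoldA_active (l : List (List String)) (c : List String) (hc : c ≠ []) (n : Int)
    (d : PySem.Dict (List String) Int) :
    ∃ m : Int, l.foldl pvStepA (some c, n, d) = (some c, m, (l.filter (pvPred c)).foldl pvDictStep d) := by
  induction l generalizing n d with
  | nil => exact ⟨n, rfl⟩
  | cons tc t ih =>
    have hnc : ¬(some c = none ∨ some c = (some ([] : List String))) := by simp [hc]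
    simp only [List.foldl_cons, pvStepA, if_neg hnc]
    by_cases h1 : some c = some tc
    · have hc1 : tc = c := by injection h1 with h1'; exact h1'.symm
      have hp : pvPred c tc = false := by simp [pvPred, hc1]
      rw [if_pos h1, List.filter_cons_of_neg (by simp [hp])]
      exact ih (n + 1) d
    · rw [if_neg h1]
      by_cases h2 : PySem.Set.issuperset (PySem.Set.ofList ((some c).getD []))
          (PySem.Set.ofList tc) = true
      · have hp : pvPred c tc = false := by
          simp only [Option.getD_some] at h2
          simp [pvPred, h2]
        rw [if_pos h2, List.filter_cons_of_neg (by simp [hp])]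
        exact ih (n + 1) d
      · have hp : pvPred c tc = true := by
          simp only [Option.getD_some] at h2
          have hne : (tc == c) = false := by
            simp only [beq_eq_false_iff_ne, ne_eq]
            intro hh; exact h1 (by rw [hh])
          simp [pvPred, hne, h2]
        rw [if_neg h2, List.filter_cons_of_pos (by simp [hp])]
        exact ih n (pvDictStep d tc)

-- the falsy phase of A's loop, phrased through B's pvSplitBase
lemma pvFoldA_falsy (l : List (List String)) (c : Option (List String)) (hc : c = none ∨ c = some [])
    (n : Int) (d : PySem.Dict (List String) Int) :
    l.foldl pvStepA (c, n, d) =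
      if (pvSplitBase l).1 = []
      then ((if l = [] then c else some []), (if l = [] then n else 1), d)
      else (pvSplitBase l).2.foldl pvStepA (some (pvSplitBase l).1, 1, d) := by
  induction l generalizing c n with
  | nil => simp [pvSplitBase]
  | cons tc t ih =>
    simp only [List.foldl_cons, pvStepA, if_pos hc]
    by_cases he : tc = []
    · subst he
      rw [ih (some []) (Or.inr rfl) 1]
      have hsb : pvSplitBase ([] :: t) = pvSplitBase t := rfl
      rw [hsb]
      split
      · split <;> simp
      · rfl
    · have hie : tc.isEmpty = false := by simp [he]
      have hsb : pvSplitBase (tc :: t) = (tc, t) := by simp [pvSplitBase, hie]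
      rw [hsb]
      simp only [if_neg he]

-- strict lexicographic > on the 3-tuple key (A's count/length/const cascade)
def pvLexGt (a b : Int × Int × Int) : Bool :=
  a.1 > b.1 || (a.1 == b.1 && (a.2.1 > b.2.1 || (a.2.1 == b.2.1 && a.2.2 > b.2.2)))

-- "first lexicographic maximum" predicate (characterises A's tie-break cascade)
def pvFM (ks : List (List String)) (K : List String → Int × Int × Int) (r : List String) : Prop :=
  ∃ i : Nat, ∃ h : i < ks.length, ks[i] = r ∧
    (∀ j (hj : j < ks.length), j < i → pvLexGt (K r) (K ks[j]) = true) ∧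
    (∀ j (hj : j < ks.length), pvLexGt (K ks[j]) (K r) = false)

lemma pvLexGt_irrefl (a : Int × Int × Int) : pvLexGt a a = false := by
  obtain ⟨a1, a2, a3⟩ := a
  simp only [pvLexGt]
  simp

lemma pvLexGt_of_ne (a b : Int × Int × Int) (h : pvLexGt a b = false) (hne : a ≠ b) :
    pvLexGt b a = true := by
  obtain ⟨a1, a2, a3⟩ := a; obtain ⟨b1, b2, b3⟩ := b
  simp only [pvLexGt] at *
  simp [Prod.ext_iff] at *
  omega

lemma pvLexGt_gt_of_gt_ge (a b c : Int × Int × Int) (h1 : pvLexGt a b = true)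
    (h2 : pvLexGt c b = false) : pvLexGt a c = true := by
  obtain ⟨a1, a2, a3⟩ := a; obtain ⟨b1, b2, b3⟩ := b; obtain ⟨c1, c2, c3⟩ := c
  simp only [pvLexGt] at *; simp at *; omega

lemma pvLexGt_le_of_le_le (a b c : Int × Int × Int) (h1 : pvLexGt a b = false)
    (h2 : pvLexGt b c = false) : pvLexGt a c = false := by
  obtain ⟨a1, a2, a3⟩ := a; obtain ⟨b1, b2, b3⟩ := b; obtain ⟨c1, c2, c3⟩ := c
  simp only [pvLexGt] at *; simp at *; omega

lemma pvLexGt_ge_gt (a b c : Int × Int × Int) (h1 : pvLexGt a b = false)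
    (h2 : pvLexGt a c = true) : pvLexGt b c = true := by
  obtain ⟨a1, a2, a3⟩ := a; obtain ⟨b1, b2, b3⟩ := b; obtain ⟨c1, c2, c3⟩ := c
  simp only [pvLexGt] at *; simp at *; omega

lemma pvLexGt_lt_le (a b c : Int × Int × Int) (h1 : pvLexGt a b = true)
    (h2 : pvLexGt a c = false) : pvLexGt b c = false := by
  obtain ⟨a1, a2, a3⟩ := a; obtain ⟨b1, b2, b3⟩ := b; obtain ⟨c1, c2, c3⟩ := c
  simp only [pvLexGt] at *; simp at *; omega

lemma pvFM_unique (ks : List (List String)) (K : List String → Int × Int × Int)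
    (r r' : List String) (h : pvFM ks K r) (h' : pvFM ks K r') : r = r' := by
  obtain ⟨i, hi, hri, he, ha⟩ := h
  obtain ⟨i', hi', hri', he', ha'⟩ := h'
  rcases lt_trichotomy i i' with hlt | heq | hgt
  · exfalso
    have h1 := he' i hi hlt
    have h2 := ha i' hi'
    rw [hri] at h1; rw [hri'] at h2
    rw [h2] at h1; exact Bool.false_ne_true h1
  · subst heq; rw [← hri, hri']
  · exfalso
    have h1 := he i' hi' hgt
    have h2 := ha' i hi
    rw [hri'] at h1; rw [hri] at h2
    rw [h2] at h1; exact Bool.false_ne_true h1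

lemma pvFM_foldl (K : List String → Int × Int × Int) :
    ∀ (kt : List (List String)) (k0 : List String),
    pvFM (k0 :: kt) K (kt.foldl (fun best k => if pvLexGt (K k) (K best) then k else best) k0) := by
  intro kt
  induction kt with
  | nil =>
    intro k0
    refine ⟨0, by simp, rfl, fun j hj hlt => by omega, fun j hj => ?_⟩
    have hj0 : j = 0 := by simpa using hj
    subst hj0
    simpa using pvLexGt_irrefl (K k0)
  | cons x t ih =>
    intro k0
    simp only [List.foldl_cons]
    by_cases hx : pvLexGt (K x) (K k0) = true
    · rw [if_pos hx]
      obtain ⟨i, hi, hr, he, ha⟩ := ih x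
      refine ⟨i + 1, by simpa using hi, by simpa using hr, ?_, ?_⟩
      · intro j hj hlt
        have hxr : pvLexGt (K x)
            (K (t.foldl (fun best k => if pvLexGt (K k) (K best) then k else best) x)) = false := by
          simpa using ha 0 (by simp)
        have hrk : pvLexGt
            (K (t.foldl (fun best k => if pvLexGt (K k) (K best) then k else best) x))
            (K k0) = true := pvLexGt_ge_gt _ _ _ hxr hx
        cases j with
        | zero => simpa using hrk
        | succ j' =>
          have := he j' (by simpa using hj) (by omega)
          simpa using this
      · intro j hj
        cases j with
        | zero =>
          have hxr : pvLexGt (K x)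
              (K (t.foldl (fun best k => if pvLexGt (K k) (K best) then k else best) x)) = false := by
            simpa using ha 0 (by simp)
          simpa using pvLexGt_lt_le _ _ _ hx hxr
        | succ j' => simpa using ha j' (by simpa using hj)
    · rw [if_neg hx]
      rw [Bool.not_eq_true] at hx
      obtain ⟨i, hi, hr, he, ha⟩ := ih k0
      cases i with
      | zero =>
        refine ⟨0, by simp, by simpa using hr, fun j hj hlt => by omega, ?_⟩
        intro j hj
        cases j with
        | zero => simpa using ha 0 (by simp)
        | succ j' =>
          cases j' with
          | zero =>
            have hrk : k0 = t.foldl (fun best k => if pvLexGt (K k) (K best) then k else best) k0 := by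
              simpa using hr
            simpa [← hrk] using hx
          | succ j'' => simpa using ha (j'' + 1) (by simpa using hj)
      | succ i' =>
        have hgt0 : pvLexGt
            (K (t.foldl (fun best k => if pvLexGt (K k) (K best) then k else best) k0))
            (K k0) = true := by
          simpa using he 0 (by simp) (by omega)
        refine ⟨i' + 2, by simpa using hi, by simpa using hr, ?_, ?_⟩
        · intro j hj hlt
          cases j with
          | zero => simpa using hgt0
          | succ j' =>
            cases j' with
            | zero => simpa using pvLexGt_gt_of_gt_ge _ _ _ hgt0 hx
            | succ j'' =>
              have := he (j'' + 1) (by simpa using hj) (by omega)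
              simpa using this
        · intro j hj
          cases j with
          | zero => simpa using ha 0 (by simp)
          | succ j' =>
            cases j' with
            | zero =>
              have hk0r : pvLexGt (K k0)
                  (K (t.foldl (fun best k => if pvLexGt (K k) (K best) then k else best) k0)) = false := by
                simpa using ha 0 (by simp)
              simpa using pvLexGt_le_of_le_le _ _ _ hx hk0r
            | succ j'' => simpa using ha (j'' + 1) (by simpa using hj)

lemma pvFM_find? (ks : List (List String)) (K : List String → Int × Int × Int)
    (p : List String → Bool) (KM : Int × Int × Int) (r : List String)
    (hfind : ks.find? p = some r)
    (hle : ∀ k ∈ ks, pvLexGt (K k) KM = false)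
    (hp : ∀ k, p k = true ↔ K k = KM) : pvFM ks K r := by
  rw [List.find?_eq_some_iff_getElem] at hfind
  obtain ⟨hpr, i, hi, hri, hearlier⟩ := hfind
  have hKr : K r = KM := (hp r).1 hpr
  refine ⟨i, hi, hri, ?_, ?_⟩
  · intro j hj hlt
    have hne : K ks[j] ≠ KM := by
      intro hh
      have hb := hearlier j hlt
      rw [(hp _).2 hh] at hb
      simp at hb
    have hle' := hle ks[j] (List.getElem_mem _)
    rw [hKr]
    exact pvLexGt_of_ne _ _ hle' hne
  · intro j hj
    rw [hKr]
    exact hle ks[j] (List.getElem_mem _)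

-- list.index of the minimum picks the first element attaining it
lemma pvIdxMin (g : List String → Int) :
    ∀ (l : List (List String)) (m : Int), (l.filter (fun k => g k == m)) ≠ [] →
    PySem.List.pyGetD l (((PySem.List.index? (l.map g) m).getD 0 : Nat) : Int) [] =
      (l.filter (fun k => g k == m)).headD [] := by
  intro l
  induction l with
  | nil => intro m h; simp at h
  | cons x t ih =>
    intro m h
    by_cases hx : (g x == m) = true
    · rw [List.filter_cons, if_pos hx]
      have hidx : PySem.List.index? ((x :: t).map g) m = some 0 := by
        simp [PySem.List.index?, List.idxOf?, List.findIdx?_cons, hx]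
      rw [hidx]
      simp
    · have hx' : (g x == m) = false := by simpa using hx
      rw [List.filter_cons, if_neg hx]
      have hne : t.filter (fun k => g k == m) ≠ [] := by
        rwa [List.filter_cons, if_neg hx] at h
      have hmem : m ∈ t.map g := by
        rcases List.exists_mem_of_ne_nil _ hne with ⟨k, hk⟩
        have := List.mem_filter.1 hk
        exact List.mem_map.2 ⟨k, this.1, by simpa using this.2⟩
      obtain ⟨j, hj⟩ : ∃ j, PySem.List.index? (t.map g) m = some j := by
        have : List.idxOf? m (t.map g) ≠ none := by
          rw [ne_eq, List.idxOf?_eq_none_iff]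
          simpa using hmem
        exact Option.ne_none_iff_exists'.1 this
      have hidx : PySem.List.index? ((x :: t).map g) m = some (j + 1) := by
        have hj' : List.findIdx? (fun y => y == m) (t.map g) = some j := hj
        simp [PySem.List.index?, List.idxOf?, List.findIdx?_cons, hx', hj']
      rw [hidx]
      have hcast : ((((some (j+1)).getD 0 : Nat)) : Int) = ((j+1 : Nat) : Int) := rfl
      rw [hcast, PySem.List.pyGetD_natCast, List.getD_cons_succ]
      have := ih m hne
      rw [hj] at this
      simpa [PySem.List.pyGetD_natCast] using this

-- A's tie-break cascade equals the first-maximum tournament over the distinct variants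
lemma pvTailEq (cnt f g : List String → Int) (k0 : List String) (kt : List (List String)) :
    (if (k0 :: kt).length = 1 then PySem.List.pyGetD (k0 :: kt) 0 []
     else if (k0 :: kt).length > 1 then
       let M := (PySem.List.max? ((k0 :: kt).map cnt) (fun v => v)).getD 0
       let valid := (((k0 :: kt).map (fun k => (k, cnt k))).filter (fun p => p.2 == M)).map (·.1)
       if valid.length = 1 then PySem.List.pyGetD valid 0 []
       else
         let L := (PySem.List.max? (valid.map f) (fun v => v)).getD 0
         let longest := valid.filter (fun k => f k == L)
         if longest.length = 1 then PySem.List.pyGetD longest 0 []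
         else
           let cc := longest.map g
           let m := (PySem.List.min? cc (fun v => v)).getD 0
           PySem.List.pyGetD longest (((PySem.List.index? cc m).getD 0 : Nat) : Int) []
     else [])
    = kt.foldl (fun best k =>
        if pvLexGt (cnt k, f k, -(g k)) (cnt best, f best, -(g best)) then k else best) k0 := by
  cases kt with
  | nil =>
    simp only [List.length_cons, List.length_nil, List.foldl_nil, if_pos rfl]
    simpa using PySem.List.pyGetD_natCast (xs := [k0]) (n := 0) (d := [])
  | cons x kt' =>
    dsimp only
    rw [if_neg (by simp), if_pos (by simp)]
    set ks := k0 :: x :: kt' with hks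
    obtain ⟨M0, hM0⟩ : ∃ v, PySem.List.max? (ks.map cnt) (fun v => v) = some v := by
      cases hh : PySem.List.max? (ks.map cnt) (fun v => v) with
      | none => rw [PySem.List.max?_eq_none_iff] at hh; simp [hks] at hh
      | some v => exact ⟨v, rfl⟩
    rw [hM0]
    simp only [Option.getD_some]
    have hvalid : ((ks.map (fun k => (k, cnt k))).filter (fun p => p.2 == M0)).map (·.1)
        = ks.filter (fun k => cnt k == M0) := by
      rw [List.filter_map, List.map_map]
      simp [Function.comp_def]
    rw [hvalid]
    set l1 := ks.filter (fun k => cnt k == M0) with hl1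
    have hl1ne : l1 ≠ [] := by
      rcases List.mem_map.1 (PySem.List.max?_mem hM0) with ⟨k, hk, hck⟩
      intro hnil
      have hmem : k ∈ l1 := List.mem_filter.2 ⟨hk, by simp [hck]⟩
      rw [hnil] at hmem
      simp at hmem
    obtain ⟨L0, hL0⟩ : ∃ v, PySem.List.max? (l1.map f) (fun v => v) = some v := by
      cases hh : PySem.List.max? (l1.map f) (fun v => v) with
      | none =>
        rw [PySem.List.max?_eq_none_iff] at hh
        exact absurd (by simpa using hh) hl1ne
      | some v => exact ⟨v, rfl⟩
    rw [hL0]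
    simp only [Option.getD_some]
    set l2 := l1.filter (fun k => f k == L0) with hl2
    have hl2ne : l2 ≠ [] := by
      rcases List.mem_map.1 (PySem.List.max?_mem hL0) with ⟨k, hk, hck⟩
      intro hnil
      have hmem : k ∈ l2 := List.mem_filter.2 ⟨hk, by simp [hck]⟩
      rw [hnil] at hmem
      simp at hmem
    obtain ⟨m0, hm0⟩ : ∃ v, PySem.List.min? (l2.map g) (fun v => v) = some v := by
      cases hh : PySem.List.min? (l2.map g) (fun v => v) with
      | none =>
        rw [PySem.List.min?_eq_none_iff] at hh
        exact absurd (by simpa using hh) hl2ne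
      | some v => exact ⟨v, rfl⟩
    rw [hm0]
    simp only [Option.getD_some]
    set l3 := l2.filter (fun k => g k == m0) with hl3
    have hl3ne : l3 ≠ [] := by
      rcases List.mem_map.1 (PySem.List.min?_mem hm0) with ⟨k, hk, hck⟩
      intro hnil
      have hmem : k ∈ l3 := List.mem_filter.2 ⟨hk, by simp [hck]⟩
      rw [hnil] at hmem
      simp at hmem
    have hcntle : ∀ k ∈ ks, cnt k ≤ M0 := fun k hk => by
      simpa using PySem.List.max?_isMax hM0 (cnt k) (List.mem_map_of_mem hk)
    have hfle : ∀ k ∈ ks, cnt k = M0 → f k ≤ L0 := fun k hk hc => by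
      have hmem : k ∈ l1 := List.mem_filter.2 ⟨hk, by simp [hc]⟩
      simpa using PySem.List.max?_isMax hL0 (f k) (List.mem_map_of_mem hmem)
    have hgge : ∀ k ∈ ks, cnt k = M0 → f k = L0 → m0 ≤ g k := fun k hk hc hf => by
      have hmem1 : k ∈ l1 := List.mem_filter.2 ⟨hk, by simp [hc]⟩
      have hmem2 : k ∈ l2 := List.mem_filter.2 ⟨hmem1, by simp [hf]⟩
      simpa using PySem.List.min?_isMin hm0 (g k) (List.mem_map_of_mem hmem2)
    have hle : ∀ k ∈ ks, pvLexGt (cnt k, f k, -(g k)) (M0, L0, -m0) = false := by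
      intro k hk
      have h1 := hcntle k hk
      by_cases h2 : cnt k = M0
      · by_cases h3 : f k = L0
        · have h4 := hgge k hk h2 h3
          simp only [pvLexGt]; simp; omega
        · have h4 := hfle k hk h2
          simp only [pvLexGt]; simp; omega
      · simp only [pvLexGt]; simp; omega
    have hl3filter : l3 = ks.filter (fun k => (g k == m0) && ((f k == L0) && (cnt k == M0))) := by
      rw [hl3, hl2, hl1, List.filter_filter, List.filter_filter]
      simp only [Bool.and_assoc]
    have hp : ∀ k : List String, ((g k == m0) && ((f k == L0) && (cnt k == M0))) = true
        ↔ ((cnt k, f k, -(g k)) : Int × Int × Int) = (M0, L0, -m0) := by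
      intro k
      simp [Prod.ext_iff]
      constructor
      · rintro ⟨ha, hb, hc⟩; exact ⟨hc, hb, by omega⟩
      · rintro ⟨ha, hb, hc⟩; exact ⟨by omega, hb, ha⟩
    have hfind : ks.find? (fun k => (g k == m0) && ((f k == L0) && (cnt k == M0)))
        = some (l3.headD []) := by
      rw [← List.head?_filter, ← hl3filter]
      cases hl3' : l3 with
      | nil => exact absurd hl3' hl3ne
      | cons a t => simp
    have hFMfind := pvFM_find? ks (fun k => (cnt k, f k, -(g k)))
      (fun k => (g k == m0) && ((f k == L0) && (cnt k == M0))) (M0, L0, -m0)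
      (l3.headD []) hfind hle hp
    have hFMfold := pvFM_foldl (fun k => (cnt k, f k, -(g k))) (x :: kt') k0
    have hmain : (x :: kt').foldl (fun best k =>
        if pvLexGt (cnt k, f k, -(g k)) (cnt best, f best, -(g best)) then k else best) k0
        = l3.headD [] := pvFM_unique ks _ _ _ hFMfold hFMfind
    rw [hmain]
    by_cases hb1 : l1.length = 1
    · rw [if_pos hb1]
      obtain ⟨a, ha⟩ := List.length_eq_one_iff.1 hb1
      have hl2a : l2 = [a] := by
        rcases List.exists_mem_of_ne_nil _ hl2ne with ⟨b, hb⟩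
        have hsub : l2 = [a].filter (fun k => f k == L0) := by rw [hl2, ha]
        rw [hsub]
        rw [hsub] at hb
        rcases List.mem_filter.1 hb with ⟨hb1', hb2⟩
        simp at hb1'
        subst hb1'
        simp [hb2]
      have hl3a : l3 = [a] := by
        rcases List.exists_mem_of_ne_nil _ hl3ne with ⟨b, hb⟩
        have hsub : l3 = [a].filter (fun k => g k == m0) := by rw [hl3, hl2a]
        rw [hsub]
        rw [hsub] at hb
        rcases List.mem_filter.1 hb with ⟨hb1', hb2⟩
        simp at hb1'
        subst hb1'
        simp [hb2]
      rw [ha, hl3a]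
      simpa using PySem.List.pyGetD_natCast (xs := [a]) (n := 0) (d := [])
    · rw [if_neg hb1]
      by_cases hb2 : l2.length = 1
      · rw [if_pos hb2]
        obtain ⟨a, ha⟩ := List.length_eq_one_iff.1 hb2
        have hl3a : l3 = [a] := by
          rcases List.exists_mem_of_ne_nil _ hl3ne with ⟨b, hb⟩
          have hsub : l3 = [a].filter (fun k => g k == m0) := by rw [hl3, ha]
          rw [hsub]
          rw [hsub] at hb
          rcases List.mem_filter.1 hb with ⟨hb1', hb2'⟩
          simp at hb1'
          subst hb1'
          simp [hb2']
        rw [ha, hl3a]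
        simpa using PySem.List.pyGetD_natCast (xs := [a]) (n := 0) (d := [])
      · rw [if_neg hb2]
        have := pvIdxMin g l2 m0 (by rw [← hl3]; exact hl3ne)
        rw [this, ← hl3]

-- ===== B-side lemmas: the sort-then-scan picks the same first lexicographic maximum =====

-- the two [CONST] counters agree
lemma pvConst_eq (v : List String) : pvConstB v = pvConstCountA v := by
  unfold pvConstB pvConstCountA
  rw [PySem.List.sum_map_ite_one_zero, PySem.List.foldl_if_add_one]
  simp

-- arithmetic facts about the 4-tuple comparison
lemma pvGt4_asymm (a b : Int × Int × Int × Int) (h : pvGt4 a b = true) : pvGt4 b a = false := by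
  obtain ⟨a1, a2, a3, a4⟩ := a; obtain ⟨b1, b2, b3, b4⟩ := b
  simp only [pvGt4] at *; simp at *; omega

lemma pvGt4_total_ne (a b : Int × Int × Int × Int) (h : pvGt4 a b = false) (hne : a ≠ b) :
    pvGt4 b a = true := by
  obtain ⟨a1, a2, a3, a4⟩ := a; obtain ⟨b1, b2, b3, b4⟩ := b
  simp only [pvGt4] at *
  simp [Prod.ext_iff] at *
  omega

lemma pvGt4_trans (a b c : Int × Int × Int × Int) (h1 : pvGt4 a b = true) (h2 : pvGt4 b c = true) :
    pvGt4 a c = true := by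
  obtain ⟨a1, a2, a3, a4⟩ := a; obtain ⟨b1, b2, b3, b4⟩ := b; obtain ⟨c1, c2, c3, c4⟩ := c
  simp only [pvGt4] at *; simp at *; omega

lemma pvGt4_of_gt3 (a b : Int × Int × Int) (x y : Int) (h : pvLexGt a b = true) :
    pvGt4 (a.1, a.2.1, a.2.2, x) (b.1, b.2.1, b.2.2, y) = true := by
  obtain ⟨a1, a2, a3⟩ := a; obtain ⟨b1, b2, b3⟩ := b
  simp only [pvGt4, pvLexGt] at *; simp at *; omega

lemma pvGt4_of_eq3_gt (a : Int × Int × Int) (x y : Int) (h : y < x) :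
    pvGt4 (a.1, a.2.1, a.2.2, x) (a.1, a.2.1, a.2.2, y) = true := by
  obtain ⟨a1, a2, a3⟩ := a
  simp only [pvGt4]; simp; omega

-- the composite key B selects by, expressed over the variant list
def pvK4 (xs : List (List String)) (v : List String) : Int × Int × Int × Int :=
  ((List.count v xs : Int), (v.length : Int), -(pvConstB v), -((xs.idxOf v : Nat) : Int))

lemma pvK4_inj (xs : List (List String)) (u w : List String) (hu : u ∈ xs) (hw : w ∈ xs)
    (hne : u ≠ w) : pvK4 xs u ≠ pvK4 xs w := by
  intro h
  have h4 : xs.idxOf u = xs.idxOf w := by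
    have := congrArg (fun p => p.2.2.2) h
    simp [pvK4] at this
    omega
  exact hne (by
    rw [← List.getElem_idxOf (List.idxOf_lt_length_of_mem hu),
        ← List.getElem_idxOf (List.idxOf_lt_length_of_mem hw)]
    simp [h4])

lemma pvK4_eq (xs : List (List String)) (v : List String) :
    pvK4 xs v = ((List.count v xs : Int), (v.length : Int), -(pvConstCountA v), -((xs.idxOf v : Nat) : Int)) := by
  simp [pvK4, pvConst_eq]

-- proof-only abbreviations for the sorted pair list
def pvLexLe (a b : List String × Int) : Prop := a.1 < b.1 ∨ (a.1 = b.1 ∧ a.2 ≤ b.2)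

def pvVsnds (l : List (List String × Int)) (v : List String) : List Int :=
  (l.filter (fun p => p.1 == v)).map (·.2)

-- enumerate equations and facts
lemma pvEnum_cons {α : Type} (x : α) (t : List α) (n : Int) :
    PySem.List.enumerate (x :: t) n = (n, x) :: PySem.List.enumerate t (n + 1) := rfl

lemma pvEnum_fst_map {α : Type} (l : List α) (n : Int) :
    ((PySem.List.enumerate l n).map (fun p => (p.2, p.1))).map (·.1) = l := by
  induction l generalizing n with
  | nil => rfl
  | cons x t ih => simp [ih]

lemma pvEnum_le {α : Type} (l : List α) (n : Int) : ∀ p ∈ PySem.List.enumerate l n, n ≤ p.1 := by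
  induction l generalizing n with
  | nil => simp [PySem.List.enumerate]
  | cons x t ih =>
    intro p hp
    rw [pvEnum_cons] at hp
    rcases List.mem_cons.1 hp with hp | hp
    · simp [hp]
    · have := ih (n + 1) p hp
      omega

lemma pvVsnds_enum_le (t : List (List String)) (m : Int) (v : List String) :
    ∀ j ∈ pvVsnds ((PySem.List.enumerate t m).map (fun p => (p.2, p.1))) v, m ≤ j := by
  intro j hj
  unfold pvVsnds at hj
  rcases List.mem_map.1 hj with ⟨p, hp, rfl⟩
  rcases List.mem_filter.1 hp with ⟨hp1, _⟩
  rcases List.mem_map.1 hp1 with ⟨q, hq, rfl⟩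
  exact pvEnum_le t m q hq

lemma pvEnum_min (l : List (List String)) (v : List String) :
    ∀ n : Int, v ∈ l →
    (n + (l.idxOf v : Int)) ∈ pvVsnds ((PySem.List.enumerate l n).map (fun p => (p.2, p.1))) v ∧
    ∀ j ∈ pvVsnds ((PySem.List.enumerate l n).map (fun p => (p.2, p.1))) v,
      n + (l.idxOf v : Int) ≤ j := by
  induction l with
  | nil => intro n hv; simp at hv
  | cons x t ih =>
    intro n hv
    by_cases hxv : x = v
    · subst hxv
      have hidx : (x :: t).idxOf x = 0 := List.idxOf_cons_self
      rw [hidx]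
      have hv0 : pvVsnds ((PySem.List.enumerate (x :: t) n).map (fun p => (p.2, p.1))) x
          = n :: pvVsnds ((PySem.List.enumerate t (n + 1)).map (fun p => (p.2, p.1))) x := by
        simp [pvVsnds]
      rw [hv0]
      refine ⟨by simp, ?_⟩
      intro j hj
      rcases List.mem_cons.1 hj with hj | hj
      · omega
      · have := pvVsnds_enum_le t (n + 1) x j hj
        omega
    · have hxvb : (x == v) = false := by simpa using hxv
      have hvt : v ∈ t := by
        rcases List.mem_cons.1 hv with h | h
        · exact absurd h.symm hxv
        · exact h
      have hidx : (x :: t).idxOf v = (t.idxOf v) + 1 := List.idxOf_cons_ne t hxv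
      have hv0 : pvVsnds ((PySem.List.enumerate (x :: t) n).map (fun p => (p.2, p.1))) v
          = pvVsnds ((PySem.List.enumerate t (n + 1)).map (fun p => (p.2, p.1))) v := by
        simp [pvVsnds, hxvb]
      rw [hidx, hv0]
      have := ih (n + 1) hvt
      constructor
      · have h1 := this.1
        have harith : n + ((t.idxOf v : Nat) + 1 : Nat) = (n + 1) + (t.idxOf v : Int) := by push_cast; ring
        rw [harith]; exact h1
      · intro j hj
        have := this.2 j hj
        push_cast
        push_cast at this
        omega

lemma pvDropWhile_head {α : Type} (p : α → Bool) (l : List α) (q : α) (r : List α)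
    (h : l.dropWhile p = q :: r) : p q = false := by
  induction l with
  | nil => simp [List.dropWhile] at h
  | cons x t ih =>
    rw [List.dropWhile_cons] at h
    by_cases hx : p x = true
    · rw [if_pos hx] at h; exact ih h
    · rw [if_neg hx] at h
      injection h with h1 _
      rw [← h1]
      simpa using hx

lemma pvRunScan_nil (b : Option ((Int × Int × Int × Int) × List String)) :
    pvRunScan b [] = b := by rw [pvRunScan.eq_def]

lemma pvRunScan_cons (b : Option ((Int × Int × Int × Int) × List String))
    (v : List String) (i : Int) (t : List (List String × Int)) :
    pvRunScan b ((v, i) :: t) = pvRunScan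
      (if (match b with
          | none => true
          | some bb => pvGt4 ((1 + (t.takeWhile (fun p : List String × Int => p.1 == v)).length : Int),
              (v.length : Int), -(pvConstB v), -i) bb.1) then
        some ((((1 + (t.takeWhile (fun p : List String × Int => p.1 == v)).length : Int),
            (v.length : Int), -(pvConstB v), -i)), v)
      else b)
      (t.dropWhile (fun p : List String × Int => p.1 == v)) := by rw [pvRunScan.eq_def]

-- the main scan invariant: pvRunScan returns the key-maximal run, with exact key pvK4
set_option maxHeartbeats 2000000 in
lemma pvScan_go (xs : List (List String)) :
    ∀ (n : Nat) (s : List (List String × Int)) (best : Option ((Int × Int × Int × Int) × List String)),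
    s.length ≤ n →
    s.Pairwise pvLexLe →
    (∀ u ∈ s.map (·.1), u ∈ xs) →
    (∀ u ∈ s.map (·.1), (s.map (·.1)).count u = List.count u xs) →
    (∀ u ∈ s.map (·.1), ((xs.idxOf u : Nat) : Int) ∈ pvVsnds s u ∧
        ∀ j ∈ pvVsnds s u, ((xs.idxOf u : Nat) : Int) ≤ j) →
    (∀ b, best = some b → b.1 = pvK4 xs b.2 ∧ b.2 ∈ xs ∧ b.2 ∉ s.map (·.1)) →
    (s ≠ [] ∨ best.isSome) →
    ∃ r, pvRunScan best s = some r ∧ r.1 = pvK4 xs r.2 ∧ r.2 ∈ xs ∧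
      (best = some r ∨ r.2 ∈ s.map (·.1)) ∧
      (∀ b, best = some b → (r = b ∨ pvGt4 r.1 b.1 = true)) ∧
      (∀ u ∈ s.map (·.1), u ≠ r.2 → pvGt4 r.1 (pvK4 xs u) = true) := by
  intro n
  induction n with
  | zero =>
    intro s best hlen hp hxs hc hi hb hne
    have hs : s = [] := by
      cases s with
      | nil => rfl
      | cons a t => simp at hlen
    subst hs
    rcases hne with h | h
    · exact absurd rfl h
    · obtain ⟨b, hbs⟩ := Option.isSome_iff_exists.1 h
      refine ⟨b, by rw [pvRunScan_nil, hbs], (hb b hbs).1, (hb b hbs).2.1, Or.inl hbs, ?_, by simp⟩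
      intro b0 h0
      rw [hbs] at h0
      injection h0 with h0'
      exact Or.inl h0'
  | succ n ih =>
    intro s best hlen hp hxs hc hi hb hne
    cases s with
    | nil =>
      rcases hne with h | h
      · exact absurd rfl h
      · obtain ⟨b, hbs⟩ := Option.isSome_iff_exists.1 h
        refine ⟨b, by rw [pvRunScan_nil, hbs], (hb b hbs).1, (hb b hbs).2.1, Or.inl hbs, ?_, by simp⟩
        intro b0 h0
        rw [hbs] at h0
        injection h0 with h0'
        exact Or.inl h0'

    | cons hd t =>
      obtain ⟨v, i⟩ := hd
      set run := t.takeWhile (fun p => p.1 == v) with hrun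
      set rest := t.dropWhile (fun p => p.1 == v) with hrest
      set key : Int × Int × Int × Int := ((1 + run.length : Int), (v.length : Int), -(pvConstB v), -i) with hkeydef
      have hsplit : run ++ rest = t := List.takeWhile_append_dropWhile
      -- structural facts about the head run
      have hvmem : v ∈ ((v, i) :: t).map (·.1) := by simp
      have hvxs : v ∈ xs := hxs v hvmem
      have hpc := List.pairwise_cons.1 hp
      have hhead : ∀ p ∈ t, pvLexLe (v, i) p := hpc.1
      have htp : t.Pairwise pvLexLe := hpc.2
      have hrunv : ∀ p ∈ run, p.1 = v := by
        intro p hpr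
        have := List.mem_takeWhile_imp hpr
        simpa using this
      have hrest_gt : ∀ p ∈ rest, v < p.1 := by
        cases hre : rest with
        | nil => simp
        | cons q r =>
          have hq : (fun p : List String × Int => p.1 == v) q = false :=
            pvDropWhile_head _ t q r (hrest.symm.trans hre)
          have hrestsub : rest.Sublist t := by rw [hrest]; exact List.dropWhile_sublist _
          have hqt : q ∈ t := hrestsub.subset (by rw [hre]; simp)
          have hqv : q.1 ≠ v := by simpa using hq
          have hvq : v < q.1 := by
            rcases hhead q hqt with h | h
            · exact h
            · exact absurd h.1.symm hqv
          intro p hpq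
          rcases List.mem_cons.1 hpq with h | h
          · rw [h]; exact hvq
          · have hrp : (q :: r).Pairwise pvLexLe := by
              rw [← hre]
              exact htp.sublist (List.dropWhile_sublist _)
            have hqp : pvLexLe q p := (List.pairwise_cons.1 hrp).1 p h
            rcases hqp with h' | h'
            · exact lt_trans hvq h'
            · rw [← h'.1]; exact hvq
      have hrest_ne : ∀ u ∈ rest.map (·.1), u ≠ v := by
        intro u hu
        rcases List.mem_map.1 hu with ⟨p, hpr, rfl⟩
        exact ne_of_gt (hrest_gt p hpr)
      have hmapfst : ((v, i) :: t).map (·.1) = v :: (run.map (·.1) ++ rest.map (·.1)) := by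
        rw [← hsplit]; simp
      -- count of v
      have hcount_run : (run.map (·.1)).count v = run.length := by
        have h2 : (run.map (·.1)).count v = (run.map (·.1)).length := by
          rw [List.count_eq_length]
          intro b hbm
          rcases List.mem_map.1 hbm with ⟨p, hpr, rfl⟩
          exact (hrunv p hpr).symm
        simpa using h2
      have hcount_rest : (rest.map (·.1)).count v = 0 := by
        rw [List.count_eq_zero]
        intro hmem
        exact hrest_ne v hmem rfl
      have hcount_v : (((v, i) :: t).map (·.1)).count v = 1 + run.length := by
        rw [hmapfst, List.count_cons_self, List.count_append, hcount_run, hcount_rest]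
        omega
      -- snd positions of v
      have hvsnds_v : pvVsnds ((v, i) :: t) v = i :: (run.map (·.2)) := by
        unfold pvVsnds
        rw [← hsplit]
        rw [List.filter_cons, List.filter_append]
        have h1 : run.filter (fun p => p.1 == v) = run := by
          rw [List.filter_eq_self]
          intro p hpr
          simp [hrunv p hpr]
        have h2 : rest.filter (fun p => p.1 == v) = [] := by
          rw [List.filter_eq_nil_iff]
          intro p hpr
          simp [ne_of_gt (hrest_gt p hpr)]
        rw [h1, h2]
        simp
      have hi_v := hi v hvmem
      have hidx_i : ((xs.idxOf v : Nat) : Int) = i := by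
        have h1 : ((xs.idxOf v : Nat) : Int) ≤ i := by
          apply hi_v.2
          rw [hvsnds_v]; simp
        have h2 : i ≤ ((xs.idxOf v : Nat) : Int) := by
          have hm := hi_v.1
          rw [hvsnds_v] at hm
          rcases List.mem_cons.1 hm with h | h
          · omega
          · rcases List.mem_map.1 h with ⟨p, hpr, hps⟩
            have hpt : p ∈ t := (List.takeWhile_sublist _).mem hpr
            have := hhead p hpt
            rcases this with h' | h'
            · exact absurd h' (by simp [hrunv p hpr])
            · rw [← hps]; exact h'.2
        omega
      have hkey_eq : key = pvK4 xs v := by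
        have hcv := hc v hvmem
        rw [hcount_v] at hcv
        unfold pvK4
        rw [hkeydef, ← hidx_i]
        have : (1 + run.length : Int) = (List.count v xs : Int) := by omega
        rw [this]
      -- hypotheses for the recursive call on the remaining runs
      have hrestsub : rest.Sublist t := by rw [hrest]; exact List.dropWhile_sublist _
      have hlen_t : t.length ≤ n := by simp at hlen; omega
      have hrest_len : rest.length ≤ n := le_trans hrestsub.length_le hlen_t
      have hrest_pair : rest.Pairwise pvLexLe := htp.sublist hrestsub
      have hsub_mem : ∀ u ∈ rest.map (·.1), u ∈ ((v, i) :: t).map (·.1) := by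
        intro u hu
        rcases List.mem_map.1 hu with ⟨p, hpr, rfl⟩
        exact List.mem_map_of_mem (List.mem_cons_of_mem _ (hrestsub.subset hpr))
      have hxs' : ∀ u ∈ rest.map (·.1), u ∈ xs := fun u hu => hxs u (hsub_mem u hu)
      have hcount_keep : ∀ u ∈ rest.map (·.1),
          (rest.map (·.1)).count u = (((v, i) :: t).map (·.1)).count u := by
        intro u hu
        have hune : u ≠ v := hrest_ne u hu
        have hrun0 : (run.map (·.1)).count u = 0 := by
          rw [List.count_eq_zero]
          intro hmem
          rcases List.mem_map.1 hmem with ⟨p, hpr, hpe⟩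
          exact hune (by rw [← hpe, hrunv p hpr])
        rw [hmapfst, List.count_cons, List.count_append, hrun0]
        simp [Ne.symm hune]
      have hc' : ∀ u ∈ rest.map (·.1), (rest.map (·.1)).count u = List.count u xs := by
        intro u hu
        rw [hcount_keep u hu]
        exact hc u (hsub_mem u hu)
      have hvsnds_keep : ∀ u, u ≠ v → pvVsnds rest u = pvVsnds ((v, i) :: t) u := by
        intro u hune
        unfold pvVsnds
        rw [← hsplit, List.filter_cons, List.filter_append]
        have hh : (((v, i) : List String × Int).1 == u) = false := by
          simp
          exact fun h => hune h.symm
        have h1 : run.filter (fun p => p.1 == u) = [] := by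
          rw [List.filter_eq_nil_iff]
          intro p hpr
          simp [hrunv p hpr]
          exact fun h => hune h.symm
        rw [h1]
        simp [hh]
      have hi' : ∀ u ∈ rest.map (·.1), ((xs.idxOf u : Nat) : Int) ∈ pvVsnds rest u ∧
          ∀ j ∈ pvVsnds rest u, ((xs.idxOf u : Nat) : Int) ≤ j := by
        intro u hu
        rw [hvsnds_keep u (hrest_ne u hu)]
        exact hi u (hsub_mem u hu)
      have hvnotrest : v ∉ rest.map (·.1) := fun hm => hrest_ne v hm rfl
      -- case analysis on the current best and whether the head run replaces it
      have hcons := pvRunScan_cons best v i t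
      rw [← hrun, ← hrest, ← hkeydef] at hcons
      have hbvkey : ∀ b', some (key, v) = some b' →
          b'.1 = pvK4 xs b'.2 ∧ b'.2 ∈ xs ∧ b'.2 ∉ rest.map (·.1) := by
        intro b' h'
        injection h' with h''
        rw [← h'']
        exact ⟨hkey_eq, hvxs, hvnotrest⟩
      cases hbest : best with
      | none =>
        rw [hbest] at hcons
        have hred : (match (none : Option ((Int × Int × Int × Int) × List String)) with
            | none => true | some bb => pvGt4 key bb.1) = true := rfl
        rw [hred, if_pos rfl] at hcons
        obtain ⟨r, hr_eq, hr1, hr2, hr_or, hr_chain, hr_dom⟩ :=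
          ih rest (some (key, v)) hrest_len hrest_pair hxs' hc' hi' hbvkey (Or.inr rfl)
        refine ⟨r, by rw [hcons]; exact hr_eq, hr1, hr2, ?_, ?_, ?_⟩
        · rcases hr_or with h | h
          · right
            injection h with h'
            rw [← h']
            simp
          · exact Or.inr (hsub_mem r.2 h)
        · intro b0 h0
          exact absurd h0 (by simp)
        · have hdomv : r.2 ≠ v → pvGt4 r.1 (pvK4 xs v) = true := by
            intro hnev
            rw [← hkey_eq]
            rcases hr_chain (key, v) rfl with h' | h'
            · exact absurd (show r.2 = v from congrArg Prod.snd h') hnev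
            · exact h'
          intro u hu hune
          rw [hmapfst] at hu
          rcases List.mem_cons.1 hu with h | h
          · rw [h] at hune ⊢
            exact hdomv (Ne.symm hune)
          · rcases List.mem_append.1 h with h | h
            · obtain ⟨p, hpr, hpe⟩ := List.mem_map.1 h
              have huv : u = v := by rw [← hpe, hrunv p hpr]
              rw [huv] at hune ⊢
              exact hdomv (Ne.symm hune)
            · exact hr_dom u h hune
      | some b =>
        rw [hbest] at hcons
        have hred : (match (some b : Option ((Int × Int × Int × Int) × List String)) with
            | none => true | some bb => pvGt4 key bb.1) = pvGt4 key b.1 := rfl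
        rw [hred] at hcons
        have hb_all := hb b hbest
        by_cases hgt : pvGt4 key b.1 = true
        · rw [if_pos hgt] at hcons
          obtain ⟨r, hr_eq, hr1, hr2, hr_or, hr_chain, hr_dom⟩ :=
            ih rest (some (key, v)) hrest_len hrest_pair hxs' hc' hi' hbvkey (Or.inr rfl)
          refine ⟨r, by rw [hcons]; exact hr_eq, hr1, hr2, ?_, ?_, ?_⟩
          · rcases hr_or with h | h
            · right
              injection h with h'
              rw [← h']
              simp
            · exact Or.inr (hsub_mem r.2 h)
          · intro b0 h0
            injection h0 with h0'
            rw [← h0']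
            rcases hr_chain (key, v) rfl with h' | h'
            · right
              rw [h']
              exact hgt
            · exact Or.inr (pvGt4_trans _ _ _ h' hgt)
          · have hdomv : r.2 ≠ v → pvGt4 r.1 (pvK4 xs v) = true := by
              intro hnev
              rw [← hkey_eq]
              rcases hr_chain (key, v) rfl with h' | h'
              · exact absurd (show r.2 = v from congrArg Prod.snd h') hnev
              · exact h'
            intro u hu hune
            rw [hmapfst] at hu
            rcases List.mem_cons.1 hu with h | h
            · rw [h] at hune ⊢
              exact hdomv (Ne.symm hune)
            · rcases List.mem_append.1 h with h | h
              · obtain ⟨p, hpr, hpe⟩ := List.mem_map.1 h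
                have huv : u = v := by rw [← hpe, hrunv p hpr]
                rw [huv] at hune ⊢
                exact hdomv (Ne.symm hune)
              · exact hr_dom u h hune
        · rw [if_neg hgt] at hcons
          simp only [Bool.not_eq_true] at hgt
          have hbne : b.2 ≠ v := fun h => hb_all.2.2 (h ▸ hvmem)
          have hkey_ne : key ≠ b.1 := by
            rw [hkey_eq, hb_all.1]
            exact pvK4_inj xs v b.2 hvxs hb_all.2.1 (fun h => hbne h.symm)
          have hbgtkey : pvGt4 b.1 key = true := pvGt4_total_ne key b.1 hgt hkey_ne
          have hbv' : ∀ b', some b = some b' →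
              b'.1 = pvK4 xs b'.2 ∧ b'.2 ∈ xs ∧ b'.2 ∉ rest.map (·.1) := by
            intro b' h'
            injection h' with h''
            rw [← h'']
            exact ⟨hb_all.1, hb_all.2.1, fun hm => hb_all.2.2 (hsub_mem b.2 hm)⟩
          obtain ⟨r, hr_eq, hr1, hr2, hr_or, hr_chain, hr_dom⟩ :=
            ih rest (some b) hrest_len hrest_pair hxs' hc' hi' hbv' (Or.inr rfl)
          have hrkey : pvGt4 r.1 key = true := by
            rcases hr_chain b rfl with h | h
            · rw [h]
              exact hbgtkey
            · exact pvGt4_trans _ _ _ h hbgtkey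
          refine ⟨r, by rw [hcons]; exact hr_eq, hr1, hr2, ?_, ?_, ?_⟩
          · rcases hr_or with h | h
            · exact Or.inl h
            · exact Or.inr (hsub_mem r.2 h)
          · intro b0 h0
            injection h0 with h0'
            rw [← h0']
            exact hr_chain b rfl
          · intro u hu hune
            rw [hmapfst] at hu
            rcases List.mem_cons.1 hu with h | h
            · rw [h, ← hkey_eq]
              exact hrkey
            · rcases List.mem_append.1 h with h | h
              · obtain ⟨p, hpr, hpe⟩ := List.mem_map.1 h
                have huv : u = v := by rw [← hpe, hrunv p hpr]
                rw [huv, ← hkey_eq]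
                exact hrkey
              · exact hr_dom u h hune

-- Set.ofList lists the distinct elements in first-occurrence order
lemma pvOF (xs : List (List String)) :
    (PySem.Set.ofList xs).Pairwise (fun u w => xs.idxOf u < xs.idxOf w) := by
  induction xs using List.reverseRecOn with
  | nil => simp [PySem.Set.ofList_eq_foldl]
  | append_singleton ys x ih =>
    have hof : PySem.Set.ofList (ys ++ [x]) = PySem.Set.add (PySem.Set.ofList ys) x := by
      rw [PySem.Set.ofList_eq_foldl, PySem.Set.ofList_eq_foldl, List.foldl_append]; rfl
    rw [hof]
    have hmemof : ∀ u, u ∈ PySem.Set.ofList ys ↔ u ∈ ys := fun u => PySem.Set.mem_ofList ys u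
    have hlift : (PySem.Set.ofList ys).Pairwise (fun u w => (ys ++ [x]).idxOf u < (ys ++ [x]).idxOf w) := by
      refine List.Pairwise.imp_of_mem ?_ ih
      intro a b ha hb hr
      rw [List.idxOf_append_of_mem ((hmemof a).1 ha), List.idxOf_append_of_mem ((hmemof b).1 hb)]
      exact hr
    by_cases hx : x ∈ ys
    · have hadd : PySem.Set.add (PySem.Set.ofList ys) x = PySem.Set.ofList ys := by
        simp [PySem.Set.add, PySem.Set.contains, (hmemof x).2 hx]
      rw [hadd]
      exact hlift
    · have hadd : PySem.Set.add (PySem.Set.ofList ys) x = PySem.Set.ofList ys ++ [x] := by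
        have hc : x ∉ PySem.Set.ofList ys := fun h => hx ((hmemof x).1 h)
        simp [PySem.Set.add, PySem.Set.contains, hc]
      rw [hadd]
      rw [List.pairwise_append]
      refine ⟨hlift, by simp, ?_⟩
      intro a ha b hb
      have hb' : b = x := by simpa using hb
      rw [hb']
      have hax : (ys ++ [x]).idxOf a = ys.idxOf a := List.idxOf_append_of_mem ((hmemof a).1 ha)
      have hxx : (ys ++ [x]).idxOf x = ys.length := by
        rw [List.idxOf_append_of_notMem hx]
        simp
      rw [hax, hxx]
      exact List.idxOf_lt_length_of_mem ((hmemof a).1 ha)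

-- A's winner (the pvFM element) strictly dominates every other variant under pvK4
lemma pvAF (xs : List (List String)) (r : List String)
    (h : pvFM (PySem.Set.ofList xs)
      (fun k => ((List.count k xs : Int), (k.length : Int), -(pvConstCountA k))) r) :
    r ∈ xs ∧ ∀ u ∈ xs, u ≠ r → pvGt4 (pvK4 xs r) (pvK4 xs u) = true := by
  obtain ⟨pos, hpos, hkr, hearl, hmax⟩ := h
  have hrks : r ∈ PySem.Set.ofList xs := hkr ▸ List.getElem_mem _
  have hrxs : r ∈ xs := (PySem.Set.mem_ofList xs r).1 hrks
  refine ⟨hrxs, ?_⟩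
  intro u hu hne
  have huks : u ∈ PySem.Set.ofList xs := (PySem.Set.mem_ofList xs u).2 hu
  obtain ⟨j, hj, hju⟩ := List.mem_iff_getElem.1 huks
  set K3 : List String → Int × Int × Int :=
    fun k => ((List.count k xs : Int), (k.length : Int), -(pvConstCountA k)) with hK3
  by_cases hK : K3 u = K3 r
  · have hjp : pos < j := by
      rcases lt_trichotomy j pos with hl | heq | hg
      · exfalso
        have h1 := hearl j hj hl
        rw [hju, hK] at h1
        rw [pvLexGt_irrefl] at h1
        exact Bool.false_ne_true h1
      · exact absurd (by subst heq; rw [← hju]; exact hkr) hne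
      · exact hg
    have hOF := (List.pairwise_iff_getElem.1 (pvOF xs)) pos j hpos hj hjp
    rw [hkr, hju] at hOF
    have h4 : -((xs.idxOf u : Nat) : Int) < -((xs.idxOf r : Nat) : Int) := by
      have := hOF; omega
    have hgt := pvGt4_of_eq3_gt (K3 r) (-((xs.idxOf r : Nat) : Int)) (-((xs.idxOf u : Nat) : Int)) h4
    rw [pvK4_eq, pvK4_eq]
    have hKu : K3 u = K3 r := hK
    rw [hK3] at hKu
    have h1 : (List.count u xs : Int) = (List.count r xs : Int) := congrArg (fun p => p.1) hKu
    have h2 : (u.length : Int) = (r.length : Int) := congrArg (fun p => p.2.1) hKu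
    have h3 : -(pvConstCountA u) = -(pvConstCountA r) := congrArg (fun p => p.2.2) hKu
    rw [h1, h2, h3]
    simpa [hK3] using hgt
  · have hle := hmax j hj
    rw [hju] at hle
    have hgt3 := pvLexGt_of_ne (K3 u) (K3 r) hle hK
    rw [pvK4_eq, pvK4_eq]
    simpa [hK3] using pvGt4_of_gt3 (K3 r) (K3 u) (-((xs.idxOf r : Nat) : Int)) (-((xs.idxOf u : Nat) : Int)) hgt3

-- ===== VERDICT (by name: the statement is the Claim_ definition above) =====
theorem check_tuned_alignment_py_spec : Claim_equal_check_tuned_alignment_py := by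
  intro ta ex _ _
  unfold Spec_check_tuned_alignment_py
  unfold check_tuned_alignment_py check_tuned_alignment_py_alt
  rcases hsb : pvSplitBase ta with ⟨base, rest⟩
  rw [pvFoldA_falsy ta none (Or.inl rfl) 0 PySem.Dict.empty, hsb]
  dsimp only
  by_cases hb : base = []
  · rw [if_pos hb]
    simp [PySem.Dict.size_empty, hb]
    split <;> simp
  · rw [if_neg hb]
    obtain ⟨m, hm⟩ := pvFoldA_active rest base hb 1 PySem.Dict.empty
    rw [hm]
    have hBp : (fun tc => !(tc == base ||
        PySem.Set.issuperset (PySem.Set.ofList base) (PySem.Set.ofList tc))) = pvPred base := rfl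
    rw [hBp]
    have hcnt : (rest.filter (pvPred base)).foldl pvDictStep PySem.Dict.empty
        = PySem.Dict.counter (rest.filter (pvPred base)) := by
      rw [show pvDictStep = (fun d (x : List String) => d.insert x (d.getD x 0 + 1)) from
        funext fun d => funext fun tc => pvDictStep_eq d tc]
      exact PySem.Dict.foldl_insert_getD_add_one_eq_counter _
    rw [hcnt]
    rw [if_neg (by simp [hb] : ¬base.isEmpty = true)]
    dsimp only
    set xs := rest.filter (pvPred base) with hxs
    have hsz : (PySem.Dict.counter xs).size = (PySem.Set.ofList xs).length := by
      show (PySem.Dict.counter xs).items.length = _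
      rw [PySem.Dict.items_counter, List.length_map]
    have hvals : (PySem.Dict.counter xs).values
        = (PySem.Set.ofList xs).map (fun k => (List.count k xs : Int)) := by
      show ((PySem.Dict.counter xs).items.map (·.2)) = _
      rw [PySem.Dict.items_counter, List.map_map]
      simp [Function.comp_def]
    have hitems : (PySem.Dict.counter xs).items
        = (PySem.Set.ofList xs).map (fun k => (k, (List.count k xs : Int))) :=
      PySem.Dict.items_counter xs
    rw [hsz, PySem.Dict.keys_counter, hvals, hitems]
    by_cases hxe : xs = []
    · rw [hxe]
      simp
    · rw [if_neg (by simp [hxe] : ¬xs.isEmpty = true)]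
      have h0 : ¬(PySem.Set.ofList xs).length = 0 := by
        intro hh
        rcases List.exists_mem_of_ne_nil xs hxe with ⟨u, hu⟩
        have : u ∈ PySem.Set.ofList xs := (PySem.Set.mem_ofList xs u).2 hu
        rw [List.length_eq_zero_iff.1 hh] at this
        simp at this
      rw [if_neg h0]
      cases hks : PySem.Set.ofList xs with
      | nil => exact absurd (by rw [hks]; rfl) h0
      | cons kk0 kkt =>
        rw [pvTailEq (fun k => (List.count k xs : Int)) (fun k => (k.length : Int)) pvConstCountA kk0 kkt]
        -- A's winner is the pvFM element, which pvAF says strictly dominates in pvK4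
        have hFM := pvFM_foldl
          (fun k => ((List.count k xs : Int), (k.length : Int), -(pvConstCountA k))) kkt kk0
        rw [← hks] at hFM
        have hAF := pvAF xs _ hFM
        -- B: the sorted occurrence list and its scan
        set occ0 : List (List String × Int) :=
          (PySem.List.enumerate xs).map (fun p => (p.2, p.1)) with hocc0
        set sl : List (List String × Int) := PySem.List.sorted occ0
          (fun p => (toLex (p.1, p.2) : Lex ((List String) × Int))) false with hsl
        have hperm : sl.Perm occ0 := PySem.List.sorted_perm _ _ _
        have hfst_eq : occ0.map (·.1) = xs := pvEnum_fst_map xs 0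
        have hfst_perm : (sl.map (·.1)).Perm xs := by
          rw [← hfst_eq]
          exact hperm.map _
        have hpair : sl.Pairwise pvLexLe := by
          have h1 := PySem.List.sorted_pairwise occ0
            (fun p => (toLex (p.1, p.2) : Lex ((List String) × Int)))
          rw [← hsl] at h1
          refine h1.imp ?_
          intro a b hab
          have := Prod.Lex.le_iff.1 hab
          exact this
        have hxsh : ∀ u ∈ sl.map (·.1), u ∈ xs := fun u hu => hfst_perm.mem_iff.1 hu
        have hch : ∀ u ∈ sl.map (·.1), (sl.map (·.1)).count u = List.count u xs := by
          intro u hu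
          rw [(hperm.map (·.1)).count_eq u, hfst_eq]
        have hvperm : ∀ u, (pvVsnds sl u).Perm (pvVsnds occ0 u) := by
          intro u
          exact (hperm.filter _).map _
        have hih : ∀ u ∈ sl.map (·.1), ((xs.idxOf u : Nat) : Int) ∈ pvVsnds sl u ∧
            ∀ j ∈ pvVsnds sl u, ((xs.idxOf u : Nat) : Int) ≤ j := by
          intro u hu
          have hux : u ∈ xs := hxsh u hu
          have hmin := pvEnum_min xs u 0 hux
          simp only [zero_add] at hmin
          constructor
          · exact (hvperm u).mem_iff.2 hmin.1
          · intro j hj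
            exact hmin.2 j ((hvperm u).mem_iff.1 hj)
        have hslne : sl ≠ [] := by
          intro hh
          rw [hsl, PySem.List.sorted_eq_nil_iff] at hh
          rw [hh] at hfst_eq
          exact hxe (by rw [← hfst_eq]; rfl)
        obtain ⟨r, hr_eq, hr1, hr2, _, _, hr_dom⟩ :=
          pvScan_go xs sl.length sl none le_rfl hpair hxsh hch hih
            (fun b hb' => absurd hb' (by simp)) (Or.inl hslne)
        rw [hr_eq]
        dsimp only
        -- uniqueness of the strict pvGt4 dominator
        by_cases heq : kkt.foldl (fun best k =>
            if pvLexGt ((List.count k xs : Int), (k.length : Int), -pvConstCountA k)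
              ((List.count best xs : Int), (best.length : Int), -pvConstCountA best)
            then k else best) kk0 = r.2
        · exact heq
        · exfalso
          have hgt1 := hAF.2 r.2 hr2 (fun h => heq h.symm)
          have hrmem : (kkt.foldl (fun best k =>
              if pvLexGt ((List.count k xs : Int), (k.length : Int), -pvConstCountA k)
                ((List.count best xs : Int), (best.length : Int), -pvConstCountA best)
              then k else best) kk0) ∈ sl.map (·.1) := hfst_perm.mem_iff.2 hAF.1
          have hgt2 := hr_dom _ hrmem heq
          rw [hr1] at hgt2
          rw [pvGt4_asymm _ _ hgt2] at hgt1
          exact Bool.false_ne_true hgt1
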